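-- pv_equiv track=rewrite | github.com/Yoyoshix/Number_Generation | super_lucky_palindrome/pre_data.py | get_pair
-- ===== SOURCE A (Python) =====
-- def is_lucky(length):
--     if any(x in str(length) for x in "01235689"):
--         return 0
--     return 1
--
-- def get_pair(length):
--     pair = []
--     limit = length // 2    #palindrom middle
--     is_odd = length % 2
--
--     #to optimize the algorithm, we need to work with only one side of the palindrom (because palindrome are mirrors)
--     #the for loop will simulate the process of the algorithm
--     #we check for every amount of 4 and 7 within only one part of the palindrome if they are a lucky number
--     #so we need to *2 to get the real total amount of 4 and 7 and one of these two values need to be a lucky number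
--     #we also need to adapt this formula for odd length lucky numbers
--     #because the middle digit can be either a 4 or a 7, we need to check both possibility, which implies 4 differents check of is_lucky()
--     for amount_4 in range(0, limit+1):
--         if is_lucky(amount_4*2+is_odd) == 1 or is_lucky(amount_4*2) == 1 or \
--         is_lucky(length-amount_4*2-is_odd) == 1 or is_lucky(length-amount_4*2) == 1:
--             pair.append(amount_4)
--     return pair
-- ===== SOURCE B (Python) =====
-- def is_lucky(length):
--     if any(x in str(length) for x in "01235689"):
--         return 0
--     return 1
--
-- def get_pair(length):
--     # Palindromic symmetry: amount_4 qualifies iff limit - amount_4 does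
--     # (the four tested values are the same set), so test only the first
--     # half of the range and mirror the qualifying values back-to-front.
--     limit = length // 2
--     odd = length % 2
--     front = []
--     back = []
--     for a in range(0, limit // 2 + 1):
--         if any(is_lucky(v) == 1 for v in (a*2 + odd, a*2, length - a*2 - odd, length - a*2)):
--             front.append(a)
--             if a != limit - a:
--                 back.append(limit - a)
--     return front + back[::-1]
-- ===== Notes on version B (the rewrite author's own statement) =====
-- stated objective: faster
-- what changed: B exploits the mirror symmetry of the condition (amount_4 qualifies iff limit-amount_4 does) to scan only the first half of the range, emitting each qualifying index and its mirror, the mirrors collected back-to-front and reversed at the end.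
import Mathlib
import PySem

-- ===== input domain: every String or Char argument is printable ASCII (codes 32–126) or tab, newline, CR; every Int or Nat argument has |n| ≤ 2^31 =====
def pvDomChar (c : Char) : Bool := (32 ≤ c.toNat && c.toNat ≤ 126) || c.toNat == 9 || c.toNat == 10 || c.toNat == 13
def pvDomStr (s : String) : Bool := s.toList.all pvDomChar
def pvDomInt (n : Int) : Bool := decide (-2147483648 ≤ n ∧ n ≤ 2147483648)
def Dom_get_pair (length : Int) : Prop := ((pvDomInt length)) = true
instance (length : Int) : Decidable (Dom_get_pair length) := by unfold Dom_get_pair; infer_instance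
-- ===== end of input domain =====

-- B halves the loop using the mirror symmetry of the tested condition (measured faster by a constant factor).

-- ===== PORT A =====
-- shared module helper: is_lucky (identical source line in Source A and Source B)
def isLucky (n : Int) : Int :=
  if ("01235689".toList.any (fun x => PySem.Chars.isIn [x] (PySem.Int.toChars n))) then 0 else 1

def get_pair (length : Int) : List Int :=
  let limit := PySem.Int.floordiv length 2
  let is_odd := PySem.Int.mod length 2
  (PySem.List.pyRange 0 (limit + 1) 1).foldl
    (fun pair amount_4 =>
      if (isLucky (amount_4*2 + is_odd) == 1) || ((isLucky (amount_4*2) == 1) ||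
         ((isLucky (length - amount_4*2 - is_odd) == 1) || (isLucky (length - amount_4*2) == 1)))
      then pair ++ [amount_4] else pair) []

-- ===== PORT B =====
def get_pair_alt (length : Int) : List Int :=
  let limit := PySem.Int.floordiv length 2
  let odd := PySem.Int.mod length 2
  let res := (PySem.List.pyRange 0 (PySem.Int.floordiv limit 2 + 1) 1).foldl
    (fun (acc : List Int × List Int) a =>
      if ([a*2 + odd, a*2, length - a*2 - odd, length - a*2].any (fun v => isLucky v == 1))
      then (acc.1 ++ [a], if a != limit - a then acc.2 ++ [limit - a] else acc.2)
      else acc) ([], [])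
  res.1 ++ ((PySem.List.slice? res.2 none none (-1)).getD [])   -- back[::-1]

-- ===== PRECONDITION & SPEC =====
def Spec_get_pair (length : Int) (out : List Int) : Prop := out = get_pair_alt length
instance (length : Int) (out : List Int) : Decidable (Spec_get_pair length out) := by unfold Spec_get_pair; infer_instance

-- ===== CLAIM (what is proved, stated in full; the proofs are below) =====
def Claim_equal_get_pair : Prop := ∀ (length : Int), Dom_get_pair length → Spec_get_pair length (get_pair length)

-- ===== LEMMAS AND PROOFS =====

-- the common per-index condition, in A's order (defeq to both ports' inline tests)
def pvP (length odd : Int) (a : Int) : Bool :=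
  (isLucky (a*2 + odd) == 1) || ((isLucky (a*2) == 1) ||
    ((isLucky (length - a*2 - odd) == 1) || (isLucky (length - a*2) == 1)))

-- mirror symmetry of the condition
theorem pvP_mirror (length limit odd a : Int) (hL : length = 2*limit + odd) :
    pvP length odd (limit - a) = pvP length odd a := by
  unfold pvP
  rw [show length - (limit - a)*2 - odd = a*2 from by omega,
      show length - (limit - a)*2 = a*2 + odd from by omega,
      show (limit - a)*2 + odd = length - a*2 from by omega,
      show (limit - a)*2 = length - a*2 - odd from by omega]
  generalize (isLucky (a*2 + odd) == 1) = b1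
  generalize (isLucky (a*2) == 1) = b2
  generalize (isLucky (length - a*2 - odd) == 1) = b3
  generalize (isLucky (length - a*2) == 1) = b4
  cases b1 <;> cases b2 <;> cases b3 <;> cases b4 <;> rfl

-- B's paired accumulator loop, characterised
theorem pvFoldl_pair (P Q : Int → Bool) (g : Int → Int) (l : List Int) (acc1 acc2 : List Int) :
    l.foldl (fun (acc : List Int × List Int) a =>
        if P a then (acc.1 ++ [a], if Q a then acc.2 ++ [g a] else acc.2) else acc) (acc1, acc2)
      = (acc1 ++ l.filter P, acc2 ++ ((l.filter (fun a => P a && Q a)).map g)) := by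
  induction l generalizing acc1 acc2 with
  | nil => simp
  | cons x xs ih =>
    by_cases hp : P x = true
    · by_cases hq : Q x = true
      · simp [List.foldl_cons, hp, hq, ih]
      · simp at hq
        simp [List.foldl_cons, hp, hq, ih]
    · simp at hp
      simp [List.foldl_cons, hp, ih]

-- the second half of the range is the mirror image of an initial range, reversed
theorem pvRange_mirror (limit h : Int) (_h0 : 0 ≤ h) (hle : h ≤ limit) :
    PySem.List.pyRange (h+1) (limit+1) 1
      = ((PySem.List.pyRange 0 (limit - h) 1).reverse).map (fun a => limit - a) := by
  rw [PySem.List.pyRange_one, PySem.List.pyRange_one,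
      show (limit + 1 - (h + 1)).toNat = (limit - h - 0).toNat from by omega,
      ← List.map_reverse, List.map_map]
  apply List.ext_getElem (by simp)
  intro i h1 h2
  simp only [List.length_map, List.length_range] at h1
  simp only [List.getElem_map, List.getElem_reverse, List.length_range,
    List.getElem_range, Function.comp]
  have hc : (((limit - h - 0).toNat : Int)) = limit - h := by omega
  omega

-- the heart: a symmetric filter over the full range splits into the first half plus its mirror
theorem pvMain (P : Int → Bool) (limit h : Int)
    (hlim2 : limit = 2*h ∨ limit = 2*h + 1)
    (hsym : ∀ a, P (limit - a) = P a) :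
    (PySem.List.pyRange 0 (limit + 1) 1).filter P
      = (PySem.List.pyRange 0 (h + 1) 1).filter P ++
        (((PySem.List.pyRange 0 (h + 1) 1).filter
            (fun a => P a && (a != limit - a))).map (fun a => limit - a)).reverse := by
  by_cases hneg : limit < 0
  · rw [PySem.List.pyRange_one_eq_nil (show limit + 1 ≤ 0 by omega),
        PySem.List.pyRange_one_eq_nil (show h + 1 ≤ 0 by omega)]
    simp
  · have h0 : 0 ≤ h := by omega
    have hhl : h ≤ limit := by omega
    rw [PySem.List.pyRange_one_append 0 (h+1) (limit+1) (by omega) (by omega),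
        List.filter_append]
    congr 1
    rw [pvRange_mirror limit h h0 hhl, List.filter_map, List.filter_reverse, List.map_reverse]
    congr 1
    congr 1
    have hcong : (PySem.List.pyRange 0 (limit - h) 1).filter (P ∘ (fun a => limit - a))
        = (PySem.List.pyRange 0 (limit - h) 1).filter P := by
      apply List.filter_congr
      intro x _
      simp only [Function.comp_apply]
      exact hsym x
    rw [hcong]
    rcases hlim2 with he | ho
    · -- limit even: the midpoint h = limit - h is excluded by the a != limit - a test
      rw [show limit - h = h from by omega,
          PySem.List.pyRange_one_append 0 h (h+1) (by omega) (by omega),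
          List.filter_append, PySem.List.pyRange_one_singleton]
      have hqh : (P h && (h != limit - h)) = false := by
        have : limit - h = h := by omega
        simp [this]
      simp only [List.filter_cons, hqh, List.filter_nil, Bool.false_eq_true, if_false, List.append_nil]
      apply List.filter_congr
      intro x hx
      rw [PySem.List.mem_pyRange_one] at hx
      have hne : (x != limit - x) = true := by simp; omega
      simp [hne]
    · -- limit odd: no midpoint, the test a != limit - a always holds on the first half
      rw [show limit - h = h + 1 from by omega]
      symm
      apply List.filter_congr
      intro x hx
      rw [PySem.List.mem_pyRange_one] at hx
      have hne : (x != limit - x) = true := by simp; omega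
      simp [hne]

theorem get_pair_eq (length : Int) : get_pair length = get_pair_alt length := by
  unfold get_pair get_pair_alt
  simp only [List.any_cons, List.any_nil, Bool.or_false]
  set limit := PySem.Int.floordiv length 2 with hlim
  set odd := PySem.Int.mod length 2 with hodd
  have hL : length = 2*limit + odd := by
    rw [hlim, hodd]
    simp [PySem.Int.floordiv, PySem.Int.mod, Int.fdiv_eq_ediv, Int.fmod_eq_emod]
    omega
  have hlim2 : limit = 2*(PySem.Int.floordiv limit 2) ∨
      limit = 2*(PySem.Int.floordiv limit 2) + 1 := by
    have h1 : limit = 2 * PySem.Int.floordiv limit 2 + PySem.Int.mod limit 2 := by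
      simp [PySem.Int.floordiv, PySem.Int.mod, Int.fdiv_eq_ediv, Int.fmod_eq_emod]; omega
    have h2 : PySem.Int.mod limit 2 = 0 ∨ PySem.Int.mod limit 2 = 1 := by
      simp [PySem.Int.mod, Int.fmod_eq_emod]; omega
    omega
  rw [PySem.List.foldl_append_if_eq_filter, pvFoldl_pair, PySem.List.slice?_none_none_neg_one]
  simp only [List.nil_append, Option.getD_some]
  exact pvMain _ limit (PySem.Int.floordiv limit 2) hlim2
    (fun a => pvP_mirror length limit odd a hL)

-- ===== VERDICT (by name: the statement is the Claim_ definition above) =====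
theorem get_pair_spec : Claim_equal_get_pair := by
  intro length _
  unfold Spec_get_pair
  exact get_pair_eq length
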